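-- pv_equiv track=rewrite | github.com/FrommingPerson/AI_Arm | src/test.py | replace_second_space_with_slash
-- ===== SOURCE A (Python) =====
-- def replace_second_space_with_slash(message):
--     """Заменяет каждый второй пробел на '/'."""
--     space_count = 0
--     new_message = []
--
--     for char in message:
--         if char == ' ':
--             space_count += 1
--             if space_count % 2 == 0:
--                 new_message.append('/')
--                 continue
--         new_message.append(char)
--
--     return ''.join(new_message)
-- ===== SOURCE B (Python) =====
-- def replace_second_space_with_slash(message):
--     """Заменяет каждый второй пробел на '/'."""
--     parts = message.split(' ')
--     result = parts[0]
--     for i in range(1, len(parts)):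
--         result += ('/' if i % 2 == 0 else ' ') + parts[i]
--     return result
-- ===== Notes on version B (the rewrite author's own statement) =====
-- stated objective: alternative
-- what changed: Replaces the per-character loop with a space counter by splitting the string at every space and reassembling the segments with separators chosen by the space's ordinal parity.
import Mathlib
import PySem

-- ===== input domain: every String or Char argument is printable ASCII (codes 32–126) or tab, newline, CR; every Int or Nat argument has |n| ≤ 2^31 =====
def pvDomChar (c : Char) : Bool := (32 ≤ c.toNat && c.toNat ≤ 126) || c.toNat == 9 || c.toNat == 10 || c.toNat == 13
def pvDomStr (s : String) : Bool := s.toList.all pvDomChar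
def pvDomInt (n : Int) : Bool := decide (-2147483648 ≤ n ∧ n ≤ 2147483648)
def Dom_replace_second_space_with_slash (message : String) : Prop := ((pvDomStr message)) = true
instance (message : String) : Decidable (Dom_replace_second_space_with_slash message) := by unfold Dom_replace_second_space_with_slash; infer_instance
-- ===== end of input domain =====

-- B rebuilds the string from message.split(' ') with separators chosen by the space's ordinal
-- parity, instead of A's per-character loop with a space counter; same cost, different decomposition.

-- ===== PORT A =====
-- the loop over the characters: state = the space counter; the output list is built in order
def pvAGo (count : Nat) : List Char → List Char
  | [] => []
  | c :: cs =>
    if c = ' ' then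
      -- space_count += 1; on an even count append '/' and continue, else fall through to append char
      if (count + 1) % 2 == 0 then '/' :: pvAGo (count + 1) cs
      else c :: pvAGo (count + 1) cs
    else c :: pvAGo count cs

def replace_second_space_with_slash (message : String) : String :=
  String.mk (pvAGo 0 message.toList)

-- ===== PORT B =====
-- the loop over parts[1:] with its 1-based index i: sep = '/' if i % 2 == 0 else ' '
def pvBGlue (i : Nat) : List (List Char) → List Char
  | [] => []
  | p :: ps => (if i % 2 == 0 then '/' else ' ') :: (p ++ pvBGlue (i + 1) ps)

-- message.split(' ') is ported as List.splitOn ' ' on the char list: exact for a one-char separator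
def replace_second_space_with_slash_alt (message : String) : String :=
  let parts := message.toList.splitOn ' '
  String.mk (parts.headD [] ++ pvBGlue 1 parts.tail)

-- ===== PRECONDITION & SPEC =====
def Spec_replace_second_space_with_slash (message : String) (out : String) : Prop := out = replace_second_space_with_slash_alt message
instance (message : String) (out : String) : Decidable (Spec_replace_second_space_with_slash message out) := by unfold Spec_replace_second_space_with_slash; infer_instance

-- ===== CLAIM (what is proved, stated in full; the proofs are below) =====
def Claim_equal_replace_second_space_with_slash : Prop := ∀ (message : String), Dom_replace_second_space_with_slash message → Spec_replace_second_space_with_slash message (replace_second_space_with_slash message)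

-- ===== LEMMAS AND PROOFS =====

-- Loop invariant: after n spaces seen, the rest of A's loop output is the first remaining
-- segment followed by the glued tail of the split, with the separator index continuing at n+1.
theorem pvAGo_eq_split (cs : List Char) : ∀ n : Nat,
    pvAGo n cs = (cs.splitOn ' ').headD [] ++ pvBGlue (n + 1) (cs.splitOn ' ').tail := by
  induction cs with
  | nil => intro n; simp [pvAGo, List.splitOn, List.splitOnP_nil, pvBGlue]
  | cons c cs ih =>
    intro n
    by_cases hc : c = ' '
    · subst hc
      simp only [List.splitOn, List.splitOnP_cons, beq_self_eq_true, if_pos]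
      rcases hq : List.splitOnP (fun x => x == ' ') cs with _ | ⟨q0, qs⟩
      · exact absurd hq (List.splitOnP_ne_nil _ cs)
      · have := ih (n + 1)
        simp only [List.splitOn, hq] at this
        simp [pvAGo, pvBGlue, this]
        split_ifs <;> simp
    · have hb : (c == ' ') = false := by simp [hc]
      simp only [List.splitOn, List.splitOnP_cons, hb, if_neg Bool.false_ne_true]
      rcases hq : List.splitOnP (fun x => x == ' ') cs with _ | ⟨q0, qs⟩
      · exact absurd hq (List.splitOnP_ne_nil _ cs)
      · have := ih n
        simp only [List.splitOn, hq] at this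
        simp [pvAGo, hc, this, List.modifyHead]

-- ===== VERDICT (by name: the statement is the Claim_ definition above) =====
theorem replace_second_space_with_slash_spec : Claim_equal_replace_second_space_with_slash := by
  intro message _
  unfold Spec_replace_second_space_with_slash replace_second_space_with_slash
    replace_second_space_with_slash_alt
  rw [pvAGo_eq_split]
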